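-- pv_equiv track=rewrite | github.com/devdollzai/TermSwarmX | sample_plugin.py | analyze_code_complexity
-- ===== SOURCE A (Python) =====
-- def analyze_code_complexity(code: str) -> str:
--     """Analyze code complexity and provide insights"""
--     lines = code.split('\n')
--     complexity_score = 0
--
--     # Simple complexity analysis
--     for line in lines:
--         line = line.strip()
--         if line.startswith('if ') or line.startswith('elif '):
--             complexity_score += 1
--         elif line.startswith('for ') or line.startswith('while '):
--             complexity_score += 2
--         elif line.startswith('def ') or line.startswith('class '):
--             complexity_score += 1
--         elif ' and ' in line or ' or ' in line:
--             complexity_score += 1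
--
--     if complexity_score <= 3:
--         level = "Low"
--         recommendation = "Code is well-structured and maintainable."
--     elif complexity_score <= 7:
--         level = "Medium"
--         recommendation = "Consider breaking down complex functions."
--     else:
--         level = "High"
--         recommendation = "Refactor to reduce complexity. Consider extracting methods."
--
--     return f"""Code Complexity Analysis:
-- Complexity Score: {complexity_score}/10 ({level})
-- Recommendation: {recommendation}
--
-- Breakdown:
-- - Control structures: {sum(1 for line in lines if line.strip().startswith(('if ', 'elif ', 'for ', 'while ')))}
-- - Functions/Classes: {sum(1 for line in lines if line.strip().startswith(('def ', 'class ')))}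
-- - Logical operators: {sum(1 for line in lines if ' and ' in line or ' or ' in line)}"""
-- ===== SOURCE B (Python) =====
-- def _category(s):
--     """Classify a stripped line: 0=if/elif, 1=for/while, 2=def/class, 3=logical-op line, 4=other."""
--     if s.startswith(('if ', 'elif ')):
--         return 0
--     if s.startswith(('for ', 'while ')):
--         return 1
--     if s.startswith(('def ', 'class ')):
--         return 2
--     if ' and ' in s or ' or ' in s:
--         return 3
--     return 4
--
-- def analyze_code_complexity(code: str) -> str:
--     """Analyze code complexity and provide insights"""
--     lines = code.split('\n')
--     cats = [_category(line.strip()) for line in lines]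
--     score = cats.count(0) + 2 * cats.count(1) + cats.count(2) + cats.count(3)
--     if score <= 3:
--         level, recommendation = "Low", "Code is well-structured and maintainable."
--     elif score <= 7:
--         level, recommendation = "Medium", "Consider breaking down complex functions."
--     else:
--         level, recommendation = "High", "Refactor to reduce complexity. Consider extracting methods."
--     logical = sum(1 for line in lines if ' and ' in line or ' or ' in line)
--     return ("Code Complexity Analysis:\n"
--             f"Complexity Score: {score}/10 ({level})\n"
--             f"Recommendation: {recommendation}\n\n"
--             "Breakdown:\n"
--             f"- Control structures: {cats.count(0) + cats.count(1)}\n"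
--             f"- Functions/Classes: {cats.count(2)}\n"
--             f"- Logical operators: {logical}")
-- ===== Notes on version B (the rewrite author's own statement) =====
-- stated objective: alternative
-- what changed: B classifies each line once into a category number and derives the score (as an arithmetic combination of category counts) and the breakdown counts by counting categories, instead of A's branch-accumulating score loop plus three independent breakdown scans over the lines.
import Mathlib
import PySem

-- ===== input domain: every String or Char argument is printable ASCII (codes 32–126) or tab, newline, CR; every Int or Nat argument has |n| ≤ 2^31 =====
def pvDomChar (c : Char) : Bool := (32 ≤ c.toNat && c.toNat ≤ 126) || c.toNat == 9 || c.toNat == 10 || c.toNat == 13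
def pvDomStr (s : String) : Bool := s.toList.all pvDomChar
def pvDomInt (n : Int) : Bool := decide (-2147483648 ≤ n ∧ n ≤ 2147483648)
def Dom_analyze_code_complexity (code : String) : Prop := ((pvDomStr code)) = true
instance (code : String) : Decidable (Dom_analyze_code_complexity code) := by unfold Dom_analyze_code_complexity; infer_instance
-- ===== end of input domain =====

-- B re-decomposes the analysis: classify each line once into a category number and derive
-- score (as an arithmetic combination) and the breakdown counts by counting categories,
-- instead of A's branch-accumulating score loop plus three independent breakdown scans.

-- ===== PORT A =====
-- code.split('\n'): split? is none only for sep = "", so .getD [] is never taken (exact)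
-- loop body of A's score loop, as a named helper (same branches, same order)
def pvStepA (acc : Int) (line : String) : Int :=
  let l := PySem.Str.strip line
  if PySem.Str.startswith l "if " || PySem.Str.startswith l "elif " then acc + 1
  else if PySem.Str.startswith l "for " || PySem.Str.startswith l "while " then acc + 2
  else if PySem.Str.startswith l "def " || PySem.Str.startswith l "class " then acc + 1
  else if PySem.Str.isIn " and " l || PySem.Str.isIn " or " l then acc + 1
  else acc

def analyze_code_complexity (code : String) : String :=
  let lines := (PySem.Str.split? code "\n").getD []
  let complexity_score : Int := lines.foldl pvStepA 0
  let level := if complexity_score ≤ 3 then "Low" else if complexity_score ≤ 7 then "Medium" else "High"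
  let recommendation :=
    if complexity_score ≤ 3 then "Code is well-structured and maintainable."
    else if complexity_score ≤ 7 then "Consider breaking down complex functions."
    else "Refactor to reduce complexity. Consider extracting methods."
  let control : Int := (lines.countP (fun line =>
    PySem.Str.startswith (PySem.Str.strip line) "if " || PySem.Str.startswith (PySem.Str.strip line) "elif " ||
    PySem.Str.startswith (PySem.Str.strip line) "for " || PySem.Str.startswith (PySem.Str.strip line) "while ") : Nat)
  let funcs : Int := (lines.countP (fun line =>
    PySem.Str.startswith (PySem.Str.strip line) "def " || PySem.Str.startswith (PySem.Str.strip line) "class ") : Nat)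
  let logical : Int := (lines.countP (fun line =>
    PySem.Str.isIn " and " line || PySem.Str.isIn " or " line) : Nat)
  "Code Complexity Analysis:\nComplexity Score: " ++ PySem.Int.toStr complexity_score ++ "/10 (" ++ level ++
  ")\nRecommendation: " ++ recommendation ++ "\n\nBreakdown:\n- Control structures: " ++ PySem.Int.toStr control ++
  "\n- Functions/Classes: " ++ PySem.Int.toStr funcs ++ "\n- Logical operators: " ++ PySem.Int.toStr logical

-- ===== PORT B =====
def pvCategory (s : String) : Nat :=
  if PySem.Str.startswith s "if " || PySem.Str.startswith s "elif " then 0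
  else if PySem.Str.startswith s "for " || PySem.Str.startswith s "while " then 1
  else if PySem.Str.startswith s "def " || PySem.Str.startswith s "class " then 2
  else if PySem.Str.isIn " and " s || PySem.Str.isIn " or " s then 3
  else 4

def analyze_code_complexity_alt (code : String) : String :=
  let lines := (PySem.Str.split? code "\n").getD []
  let cats := lines.map (fun line => pvCategory (PySem.Str.strip line))
  let score : Int := ((cats.count 0 : Nat) : Int) + 2 * ((cats.count 1 : Nat) : Int)
    + ((cats.count 2 : Nat) : Int) + ((cats.count 3 : Nat) : Int)
  let lr := if score ≤ 3 then ("Low", "Code is well-structured and maintainable.")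
    else if score ≤ 7 then ("Medium", "Consider breaking down complex functions.")
    else ("High", "Refactor to reduce complexity. Consider extracting methods.")
  let logical : Int := (lines.countP (fun line =>
    PySem.Str.isIn " and " line || PySem.Str.isIn " or " line) : Nat)
  "Code Complexity Analysis:\nComplexity Score: " ++ PySem.Int.toStr score ++ "/10 (" ++ lr.1 ++
  ")\nRecommendation: " ++ lr.2 ++ "\n\nBreakdown:\n- Control structures: " ++
  PySem.Int.toStr (((cats.count 0 : Nat) : Int) + ((cats.count 1 : Nat) : Int)) ++
  "\n- Functions/Classes: " ++ PySem.Int.toStr ((cats.count 2 : Nat) : Int) ++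
  "\n- Logical operators: " ++ PySem.Int.toStr logical

-- ===== PRECONDITION & SPEC =====
def Spec_analyze_code_complexity (code : String) (out : String) : Prop := out = analyze_code_complexity_alt code
instance (code : String) (out : String) : Decidable (Spec_analyze_code_complexity code out) := by unfold Spec_analyze_code_complexity; infer_instance

-- ===== CLAIM (what is proved, stated in full; the proofs are below) =====
def Claim_equal_analyze_code_complexity : Prop := ∀ (code : String), Dom_analyze_code_complexity code → Spec_analyze_code_complexity code (analyze_code_complexity code)

-- ===== LEMMAS AND PROOFS =====

-- proof-side weight of a category: what A's loop adds for a line of that category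
def pvWeight : Nat → Int
  | 0 => 1 | 1 => 2 | 2 => 1 | 3 => 1 | _ => 0

theorem pv_cat_le (s : String) : pvCategory s ≤ 4 := by
  unfold pvCategory; split_ifs <;> omega

-- from '¬P' and 'P ↔ b = true' conclude 'b = false'
theorem pv_false_of_not_iff {P : Prop} {b : Bool} (h : P ↔ b = true) (hn : ¬ P) : b = false := by
  cases b
  · rfl
  · exact absurd (h.mpr rfl) hn

theorem pv_step_eq (acc : Int) (line : String) :
    pvStepA acc line = acc + pvWeight (pvCategory (PySem.Str.strip line)) := by
  simp only [pvStepA, pvCategory]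
  split_ifs <;> simp [pvWeight]

-- two different (non-prefix-comparable) prefixes cannot both start the same line
theorem pv_excl (s p q : String) (h1 : ¬ p.toList <+: q.toList) (h2 : ¬ q.toList <+: p.toList)
    (hp : PySem.Str.startswith s p = true) : PySem.Str.startswith s q = false := by
  rw [PySem.Str.startswith_eq, PySem.Chars.startswith_iff] at hp
  rw [PySem.Str.startswith_eq]
  cases h : PySem.Chars.startswith s.toList q.toList
  · rfl
  · rw [PySem.Chars.startswith_iff] at h
    rcases le_total p.toList.length q.toList.length with hl | hl
    · exact absurd (List.prefix_of_prefix_length_le hp h hl) h1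
    · exact absurd (List.prefix_of_prefix_length_le h hp hl) h2

-- a line has category 0 or 1 iff it starts with one of the four control keywords
theorem pv_cat01_iff (s : String) :
    ((pvCategory s = 0 ∨ pvCategory s = 1)) ↔
      (PySem.Str.startswith s "if " || PySem.Str.startswith s "elif " ||
       PySem.Str.startswith s "for " || PySem.Str.startswith s "while ") = true := by
  unfold pvCategory
  split_ifs with h1 h2 h3 h4 <;> simp_all [Bool.or_eq_true]

-- a line has category 2 iff it starts with 'def ' or 'class '
theorem pv_cat2_iff (s : String) :
    (pvCategory s = 2) ↔
      (PySem.Str.startswith s "def " || PySem.Str.startswith s "class ") = true := by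
  unfold pvCategory
  split_ifs with h1 h2 h3 h4
  · simp only [Bool.or_eq_true] at h1 ⊢
    constructor
    · intro h; exact absurd h (by decide)
    · rintro (hd | hc) <;> rcases h1 with hi | he
      · have := pv_excl s "def " "if " (by decide) (by decide) hd; simp_all
      · have := pv_excl s "def " "elif " (by decide) (by decide) hd; simp_all
      · have := pv_excl s "class " "if " (by decide) (by decide) hc; simp_all
      · have := pv_excl s "class " "elif " (by decide) (by decide) hc; simp_all
  · simp only [Bool.or_eq_true] at h2 ⊢
    constructor
    · intro h; exact absurd h (by decide)
    · rintro (hd | hc) <;> rcases h2 with hf | hw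
      · have := pv_excl s "def " "for " (by decide) (by decide) hd; simp_all
      · have := pv_excl s "def " "while " (by decide) (by decide) hd; simp_all
      · have := pv_excl s "class " "for " (by decide) (by decide) hc; simp_all
      · have := pv_excl s "class " "while " (by decide) (by decide) hc; simp_all
  · simpa using h3
  · simp_all
  · simp_all

-- A's score fold equals B's category-count combination
theorem pv_score_eq (lines : List String) (acc : Int) :
    lines.foldl pvStepA acc
    = acc + (((lines.map (fun line => pvCategory (PySem.Str.strip line))).count 0 : Nat) : Int)
        + 2 * (((lines.map (fun line => pvCategory (PySem.Str.strip line))).count 1 : Nat) : Int)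
        + (((lines.map (fun line => pvCategory (PySem.Str.strip line))).count 2 : Nat) : Int)
        + (((lines.map (fun line => pvCategory (PySem.Str.strip line))).count 3 : Nat) : Int) := by
  induction lines generalizing acc with
  | nil => simp
  | cons l ls ih =>
    rw [List.foldl_cons, ih, pv_step_eq]
    simp only [List.map_cons, List.count_cons]
    have hc := pv_cat_le (PySem.Str.strip l)
    generalize h : pvCategory (PySem.Str.strip l) = c
    rw [h] at hc
    interval_cases c <;> simp [pvWeight] <;> omega

-- A's control-structure scan equals B's category counts 0 + 1
theorem pv_control_eq (lines : List String) :
    lines.countP (fun line =>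
      PySem.Str.startswith (PySem.Str.strip line) "if " || PySem.Str.startswith (PySem.Str.strip line) "elif " ||
      PySem.Str.startswith (PySem.Str.strip line) "for " || PySem.Str.startswith (PySem.Str.strip line) "while ")
    = (lines.map (fun line => pvCategory (PySem.Str.strip line))).count 0
      + (lines.map (fun line => pvCategory (PySem.Str.strip line))).count 1 := by
  induction lines with
  | nil => simp
  | cons l ls ih =>
    simp only [List.countP_cons, List.map_cons, List.count_cons]
    rw [ih]
    have hp := pv_cat01_iff (PySem.Str.strip l)
    have hc := pv_cat_le (PySem.Str.strip l)
    generalize h : pvCategory (PySem.Str.strip l) = c at hp hc ⊢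
    interval_cases c <;>
      [ (rw [if_pos (hp.mp (Or.inl rfl))]; simp; try omega);
        (rw [if_pos (hp.mp (Or.inr rfl))]; simp; try omega);
        (rw [if_neg (by rw [pv_false_of_not_iff hp (by omega)]; simp)]; simp; try omega);
        (rw [if_neg (by rw [pv_false_of_not_iff hp (by omega)]; simp)]; simp; try omega);
        (rw [if_neg (by rw [pv_false_of_not_iff hp (by omega)]; simp)]; simp; try omega) ]

-- A's functions/classes scan equals B's category count 2
theorem pv_funcs_eq (lines : List String) :
    lines.countP (fun line =>
      PySem.Str.startswith (PySem.Str.strip line) "def " || PySem.Str.startswith (PySem.Str.strip line) "class ")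
    = (lines.map (fun line => pvCategory (PySem.Str.strip line))).count 2 := by
  induction lines with
  | nil => simp
  | cons l ls ih =>
    simp only [List.countP_cons, List.map_cons, List.count_cons]
    rw [ih]
    have hp := pv_cat2_iff (PySem.Str.strip l)
    have hc := pv_cat_le (PySem.Str.strip l)
    generalize h : pvCategory (PySem.Str.strip l) = c at hp hc ⊢
    interval_cases c <;>
      [ (rw [if_neg (by rw [pv_false_of_not_iff hp (by omega)]; simp)]; simp; try omega);
        (rw [if_neg (by rw [pv_false_of_not_iff hp (by omega)]; simp)]; simp; try omega);
        (rw [if_pos (hp.mp rfl)]; simp; try omega);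
        (rw [if_neg (by rw [pv_false_of_not_iff hp (by omega)]; simp)]; simp; try omega);
        (rw [if_neg (by rw [pv_false_of_not_iff hp (by omega)]; simp)]; simp; try omega) ]

-- ===== VERDICT =====
theorem analyze_code_complexity_spec : Claim_equal_analyze_code_complexity := by
  intro code _
  unfold Spec_analyze_code_complexity analyze_code_complexity analyze_code_complexity_alt
  simp only [pv_score_eq, pv_control_eq, pv_funcs_eq, zero_add, Nat.cast_add]
  split_ifs <;> rfl
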